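-- pv_equiv track=rewrite | github.com/Chandu00756/Omega-PHR | omega_phr/loops.py | _verify_repetition_pattern
-- ===== SOURCE A (Python) =====
-- def _verify_repetition_pattern(
--     outputs: list[str], start: int, pattern_length: int
-- ) -> bool:
--     """Verify if a repetition pattern holds."""
--     for i in range(start + pattern_length, len(outputs), pattern_length):
--         end_idx = min(i + pattern_length, len(outputs))
--         pattern_end = min(start + pattern_length, len(outputs))
--
--         for j in range(end_idx - i):
--             if i + j >= len(outputs) or start + j >= pattern_end:
--                 break
--             if outputs[i + j] != outputs[start + j]:
--                 return False
--     return True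
-- ===== SOURCE B (Python) =====
-- def _verify_repetition_pattern(outputs, start, pattern_length):
--     """Verify if a repetition pattern holds."""
--     return all(
--         outputs[k] == outputs[start + (k - start) % pattern_length]
--         for k in range(start + pattern_length, len(outputs))
--     )
-- ===== Notes on version B (the rewrite author's own statement) =====
-- stated objective: simpler
-- what changed: Replaces the nested block loop with break/return bookkeeping by a single flat all(...) over the tail, mapping each index back into the pattern window with modular arithmetic.
-- outside the precondition, e.g. on _verify_repetition_pattern(['a', 'b'], 0, -1): A returns True, B returns False; on _verify_repetition_pattern(['a', 'b'], -5, 1): A raises IndexError, B raises IndexError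
import Mathlib
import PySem

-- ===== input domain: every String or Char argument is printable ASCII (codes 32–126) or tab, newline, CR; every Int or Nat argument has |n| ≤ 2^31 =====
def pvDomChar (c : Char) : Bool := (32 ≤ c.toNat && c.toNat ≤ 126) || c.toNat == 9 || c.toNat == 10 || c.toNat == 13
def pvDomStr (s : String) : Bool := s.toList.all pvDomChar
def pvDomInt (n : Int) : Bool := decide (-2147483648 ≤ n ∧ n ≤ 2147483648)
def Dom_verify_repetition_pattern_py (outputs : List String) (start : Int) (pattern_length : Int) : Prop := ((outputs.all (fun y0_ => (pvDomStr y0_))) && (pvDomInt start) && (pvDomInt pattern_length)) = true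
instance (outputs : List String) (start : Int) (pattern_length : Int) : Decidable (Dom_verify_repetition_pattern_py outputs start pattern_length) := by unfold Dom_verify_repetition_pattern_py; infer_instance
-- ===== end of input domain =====

-- B replaces A's nested block loops (with break/return bookkeeping) by one flat pass over the
-- tail indices, comparing each element against the pattern window via modular index mapping:
-- simpler, same O(n) cost.

-- ===== PORT A =====
-- inner 'for j in range(end_idx - i)' with its break (→ true, continue) and 'return False' (→ false)
def pvInnerA (outputs : List String) (start pattern_end i : Int) : List Int → Bool
  | [] => true
  | j :: js =>
    if i + j ≥ (outputs.length : Int) ∨ start + j ≥ pattern_end then true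
    else if PySem.List.pyGetD outputs (i + j) "" ≠ PySem.List.pyGetD outputs (start + j) "" then false
    else pvInnerA outputs start pattern_end i js

-- outer 'for i in range(start + pattern_length, len(outputs), pattern_length)'
def pvOuterA (outputs : List String) (start pl : Int) : List Int → Bool
  | [] => true
  | i :: is =>
    let end_idx := min (i + pl) ((outputs.length : Int))
    let pattern_end := min (start + pl) ((outputs.length : Int))
    if pvInnerA outputs start pattern_end i (PySem.List.pyRange 0 (end_idx - i) 1) then
      pvOuterA outputs start pl is
    else false

def verify_repetition_pattern_py (outputs : List String) (start : Int) (pattern_length : Int) : Bool :=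
  pvOuterA outputs start pattern_length
    (PySem.List.pyRange (start + pattern_length) ((outputs.length : Int)) pattern_length)

-- ===== PORT B =====
def verify_repetition_pattern_py_alt (outputs : List String) (start : Int) (pattern_length : Int) : Bool :=
  (PySem.List.pyRange (start + pattern_length) ((outputs.length : Int)) 1).all
    (fun k =>
      PySem.List.pyGetD outputs k "" ==
      PySem.List.pyGetD outputs (start + PySem.Int.mod (k - start) pattern_length) "")

-- ===== PRECONDITION & SPEC =====
-- Pre_ excludes exactly: pattern_length = 0, where Python A raises ValueError; start < -len
-- with a non-empty scan, where A raises IndexError; and negative pattern_length with a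
-- non-empty scan, where A's unconditional True is the accident of descending ranges whose
-- blocks are all empty.
def Pre_verify_repetition_pattern_py (outputs : List String) (start : Int) (pattern_length : Int) : Prop :=
  pattern_length ≠ 0 ∧
    ((outputs.length : Int) ≤ start + pattern_length ∨
      (1 ≤ pattern_length ∧ -(outputs.length : Int) ≤ start))
instance (outputs : List String) (start : Int) (pattern_length : Int) : Decidable (Pre_verify_repetition_pattern_py outputs start pattern_length) := by unfold Pre_verify_repetition_pattern_py; infer_instance

def pvWitness_verify_repetition_pattern_py : List String × Int × Int := (["a", "b", "a", "b"], 0, 2)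

def Spec_verify_repetition_pattern_py (outputs : List String) (start : Int) (pattern_length : Int) (out : Bool) : Prop := out = verify_repetition_pattern_py_alt outputs start pattern_length
instance (outputs : List String) (start : Int) (pattern_length : Int) (out : Bool) : Decidable (Spec_verify_repetition_pattern_py outputs start pattern_length out) := by unfold Spec_verify_repetition_pattern_py; infer_instance

-- ===== CLAIM (what is proved, stated in full; the proofs are below) =====
def Claim_equal_verify_repetition_pattern_py : Prop := ∀ (outputs : List String) (start : Int) (pattern_length : Int), Dom_verify_repetition_pattern_py outputs start pattern_length → Pre_verify_repetition_pattern_py outputs start pattern_length → Spec_verify_repetition_pattern_py outputs start pattern_length (verify_repetition_pattern_py outputs start pattern_length)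

-- ===== LEMMAS AND PROOFS =====

theorem pv_all_congr_mem {α : Type} (l : List α) (f g : α → Bool)
    (h : ∀ x ∈ l, f x = g x) : l.all f = l.all g := by
  induction l with
  | nil => rfl
  | cons x xs ih =>
    simp only [List.all_cons, h x (by simp), ih (fun y hy => h y (by simp [hy]))]

theorem pyRange_pos_cons (a b s : Int) (hs : 0 < s) (hab : a < b) :
    PySem.List.pyRange a b s = a :: PySem.List.pyRange (a + s) b s := by
  rw [PySem.List.pyRange_of_pos _ _ hs, PySem.List.pyRange_of_pos _ _ hs]
  by_cases h : a + s < b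
  · simp only [if_pos hab, if_pos h]
    have key : ((b - a + s - 1) / s).toNat = ((b - (a + s) + s - 1) / s).toNat + 1 := by
      have h1 : b - a + s - 1 = (b - (a + s) + s - 1) + 1 * s := by ring
      rw [h1, Int.add_mul_ediv_right _ _ (by omega : s ≠ 0)]
      have h2 : 0 ≤ (b - (a + s) + s - 1) / s := Int.ediv_nonneg (by omega) (by omega)
      omega
    rw [key, List.range_succ_eq_map]
    simp [List.map_map, Function.comp]
    intro k _; ring
  · simp only [if_pos hab, if_neg h]
    have key : ((b - a + s - 1) / s).toNat = 1 := by
      have hb : b - a + s - 1 = (b - a - 1) + 1 * s := by ring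
      have h2 : (b - a - 1) / s = 0 := Int.ediv_eq_zero_of_lt (by omega) (by omega)
      rw [hb, Int.add_mul_ediv_right _ _ (by omega : s ≠ 0), h2]
      rfl
    rw [key]
    simp

theorem pyRange_pos_nil (a b s : Int) (hs : 0 < s) (hab : b ≤ a) :
    PySem.List.pyRange a b s = [] := by
  rw [PySem.List.pyRange_of_pos _ _ hs, if_neg (by omega)]
  rfl

-- the modular index map sends k = i + j (block i ≡ start mod pl, 0 ≤ j < pl) back to start + j
theorem pv_mod_block (start pl i j : Int) (hp : 0 < pl) (hdvd : pl ∣ i - start)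
    (hj0 : 0 ≤ j) (hj : j < pl) : PySem.Int.mod (i + j - start) pl = j := by
  rw [PySem.Int.mod_eq_emod_of_pos hp]
  obtain ⟨m, hm⟩ := hdvd
  have h1 : i + j - start = j + pl * m := by omega
  rw [h1, Int.add_mul_emod_self_left, Int.emod_eq_of_lt hj0 hj]

-- inside a block neither break condition fires, so the inner loop is a plain 'all'
theorem pvInnerA_eq_all (outputs : List String) (start pat_end i : Int) (js : List Int)
    (h : ∀ j ∈ js, ¬(i + j ≥ (outputs.length : Int) ∨ start + j ≥ pat_end)) :
    pvInnerA outputs start pat_end i js =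
      js.all (fun j => PySem.List.pyGetD outputs (i + j) "" == PySem.List.pyGetD outputs (start + j) "") := by
  induction js with
  | nil => rfl
  | cons j js ih =>
    rw [pvInnerA, if_neg (h j (by simp)), List.all_cons,
        ih (fun y hy => h y (by simp [hy]))]
    by_cases hEq : PySem.List.pyGetD outputs (i + j) "" = PySem.List.pyGetD outputs (start + j) ""
    · simp [hEq]
    · simp [hEq]

-- the outer loop over pyRange a n pl equals a flat 'all' over pyRange a n 1
theorem pv_main (outputs : List String) (start pl : Int) (hp : 1 ≤ pl) :
    ∀ (c : Nat) (a : Int), (((outputs.length : Int)) - a).toNat ≤ c → start + pl ≤ a →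
      pl ∣ a - start →
      pvOuterA outputs start pl (PySem.List.pyRange a ((outputs.length : Int)) pl) =
        (PySem.List.pyRange a ((outputs.length : Int)) 1).all
          (fun k => PySem.List.pyGetD outputs k "" ==
            PySem.List.pyGetD outputs (start + PySem.Int.mod (k - start) pl) "") := by
  intro c
  induction c with
  | zero =>
    intro a hc _ _
    rw [pyRange_pos_nil _ _ _ (by omega) (by omega),
        PySem.List.pyRange_one_eq_nil (by omega)]
    rfl
  | succ c ih =>
    intro a hc ha hdvd
    set n : Int := ((outputs.length : Int)) with hn
    by_cases hlt : a < n
    · rw [pyRange_pos_cons _ _ _ (by omega) hlt]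
      set e : Int := min (a + pl) n with he
      have hae : a ≤ e := by omega
      have hen : e ≤ n := by omega
      -- the block [a, e) : inner loop = all over j ∈ [0, e - a)
      have hblock : pvInnerA outputs start (min (start + pl) n) a (PySem.List.pyRange 0 (e - a) 1) =
          (PySem.List.pyRange a e 1).all
            (fun k => PySem.List.pyGetD outputs k "" ==
              PySem.List.pyGetD outputs (start + PySem.Int.mod (k - start) pl) "") := by
        rw [pvInnerA_eq_all]
        · -- reindex k = a + j
          rw [PySem.List.pyRange_one a e, PySem.List.pyRange_one 0 (e - a)]
          simp only [Int.zero_add, List.all_map, Int.sub_zero]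
          apply pv_all_congr_mem
          intro k hk
          rw [List.mem_range] at hk
          have hkj : (k : Int) < e - a := by omega
          have hmod : PySem.Int.mod (a + (k : Int) - start) pl = (k : Int) :=
            pv_mod_block start pl a (k : Int) (by omega) hdvd (by omega) (by omega)
          simp only [Function.comp, hmod]
        · intro j hj
          rw [PySem.List.mem_pyRange_one] at hj
          push Not
          constructor
          · omega
          · -- start + j < min (start + pl) n
            have h1 : start + j < start + pl := by omega
            have h2 : start + j < n := by omega
            omega
      rw [pvOuterA]
      simp only [← he, ← hn]
      rw [hblock]
      -- split the flat range at e and handle the recursive call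
      have hsplit : PySem.List.pyRange a n 1 =
          PySem.List.pyRange a e 1 ++ PySem.List.pyRange e n 1 :=
        PySem.List.pyRange_one_append a e n hae hen
      rw [hsplit, List.all_append]
      have htail : pvOuterA outputs start pl (PySem.List.pyRange (a + pl) n pl) =
          (PySem.List.pyRange e n 1).all
            (fun k => PySem.List.pyGetD outputs k "" ==
              PySem.List.pyGetD outputs (start + PySem.Int.mod (k - start) pl) "") := by
        by_cases hfit : a + pl ≤ n
        · have hea : e = a + pl := by omega
          rw [hea]
          obtain ⟨m, hm⟩ := hdvd
          exact ih (a + pl) (by omega) (by omega) ⟨m + 1, by rw [mul_add, mul_one]; omega⟩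
        · have hea : e = n := by omega
          rw [hea, pyRange_pos_nil _ _ _ (by omega) (by omega),
              PySem.List.pyRange_one_eq_nil (by omega)]
          rfl
      rw [htail]
      by_cases hb : (PySem.List.pyRange a e 1).all
          (fun k => PySem.List.pyGetD outputs k "" ==
            PySem.List.pyGetD outputs (start + PySem.Int.mod (k - start) pl) "") = true
      · simp [hb]
      · simp [hb]
    · rw [pyRange_pos_nil _ _ _ (by omega) (by omega),
          PySem.List.pyRange_one_eq_nil (by omega)]
      rfl

-- with a negative step every block's inner range is empty, so the outer loop returns true
theorem pv_outer_true_of_all_empty (outputs : List String) (start pl : Int) (l : List Int)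
    (h : ∀ i ∈ l, min (i + pl) ((outputs.length : Int)) - i ≤ 0) :
    pvOuterA outputs start pl l = true := by
  induction l with
  | nil => rfl
  | cons i is ih =>
    rw [pvOuterA]
    simp only [PySem.List.pyRange_one_eq_nil (h i (by simp))]
    rw [pvInnerA, if_pos rfl]
    exact ih (fun x hx => h x (by simp [hx]))

-- ===== VERDICT (by name: the statement is the Claim_ definition above) =====
theorem verify_repetition_pattern_py_spec : Claim_equal_verify_repetition_pattern_py := by
  intro outputs start pl _ hpre
  obtain ⟨hz, hcase⟩ := hpre
  unfold Spec_verify_repetition_pattern_py verify_repetition_pattern_py verify_repetition_pattern_py_alt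
  rcases hcase with hempty | ⟨hp, _⟩
  · -- len ≤ start + pl : both sides scan nothing and return true
    rw [PySem.List.pyRange_one_eq_nil (by omega)]
    rcases lt_or_gt_of_ne hz with hneg | hpos
    · exact pv_outer_true_of_all_empty outputs start pl _ (fun i hi => by
        obtain ⟨hgt, _, _⟩ := PySem.List.mem_pyRange_of_neg hneg hi
        omega)
    · rw [pyRange_pos_nil _ _ _ hpos (by omega)]
      rfl
  · exact pv_main outputs start pl hp (((outputs.length : Int)) - (start + pl)).toNat
      (start + pl) (le_refl _) (le_refl _) ⟨1, by ring⟩
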